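/-
  inverse_mdct: THE FRAME SLOTS OVER A STEP'S STORES, for every segment.

  Every cut-point assertion of inverse_mdct is `Body` + some of `SlotsBuf`, `SlotsA`, `SlotsS2`, `SlotsStep3` + a few slots of its
  own. `Body.carry` (MdctUse.lean) wants the 11 slots of `Body` re-proved at every exit, the `Slots*` structures 12 more. Here:

    * `Pre.tmp_place`, `Pre.data_off_frame`: where the temp block and the sample buffer are (one disjunction each);
    * `stepSpans A ue ws`: the windows a step may write = the stack below the steady rsp, the sample buffer, the temp block, and
      the frame slots `ws` the step overwrites, each given as `(distance below the entry rsp, length)`;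
    * `Pre.slot_stays`: ONE slot of the frame reads as before over `Mem.SameExcept (stepSpans A ue ws)`;
    * `Body.carry_slots`, `SlotsBuf.carry_sbuf`, `SlotsA.carry_sa`, `SlotsS2.carry_s2`, `SlotsStep3.carry_s3`: the structures at the
      step's exit from ONE such `SameExcept`; the side conditions on `ws` are closed numbers (`by decide`);
    * `Body.carry_frame0`: `Body ∧ SlotsBuf ∧ SlotsA` in one call;
    * `FrameSlots`, `Body.frameSlots`, `FrameSlots.slots_eqOn`, `Body.carry_of_slots`: the eleven slots of `Body` as facts about a
      memory, their frame rule over `Mem.EqOn`, and `Body.carry` taking the bundle;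
    * `Body.shadowPre_below`, `Pre.buf_live`, `Pre.tabA_live`: what a callee's precondition needs of `Body`.
-/
import Asan.CheckWalk
import Vorbis.Spec.MdctUse

open X86 X86.User Asan Vorbis Vorbis.Spec

set_option maxRecDepth 4000
set_option maxHeartbeats 4000000

namespace Vorbis.Spec.inverse_mdct

section Carry
variable {u₀ : State} {others : List Obj} {frames : List (Nat × FrameLayout)} {len : Nat} {A : Arena}
  {stored room : Int} {ysz : Nat → Nat} {k c : Nat} {ue : State} {ret : Word} {v w : State}

/-! ### Where the data blocks are -/

/-- **Where the temp block is**, as arithmetic for `u_omega`: above the image's text (`1154368 = L.textHi`), inside the data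
space (`12582912 = C00000H`), off the stack region `[700000H, 800000H)` (the arena is: AR1x). -/
theorem Pre.tmp_place (hpre : Pre others frames len A stored room ysz k c ue) :
    1154368 ≤ tmp A ue ∧ tmp A ue + 2 * n ue ≤ 12582912 ∧
    (tmp A ue + 2 * n ue ≤ 7340032 ∨ 8388608 ≤ tmp A ue) := by
  have hr := hpre.tmp_range
  have hAT : 1154368 ≤ A.B := hpre.arenaText
  have h1 := hpre.ado.ok.AR1
  have h1x := hpre.ado.ok.AR1x
  have h2 := hpre.ado.ok.AR2
  omega

/-- **The sample buffer and the temp block do not meet the stack region** `[700000H, 800000H)`. -/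
theorem Pre.data_off_frame (hp : Pre others frames len A stored room ysz k c ue) :
    (buf ue + 4 * n ue ≤ 0x700000 ∨ 0x800000 ≤ buf ue) ∧
    (tmp A ue + 2 * n ue ≤ 0x700000 ∨ 0x800000 ≤ tmp A ue) := by
  have hr := hp.tmp_range
  have hnle := hp.n_le
  have hoS := hp.offStack _ hp.buf_blk
  have h1x := hp.ado.ok.AR1x
  have h2 := hp.ado.ok.AR2
  simp only [] at hoS
  omega

/-! ### The windows a step may write -/

/-- The frame slot `(d, m)`: the `m` bytes at `ue.rsp − d`, as a window. -/
def slotSpan (ue : State) (p : Nat × Nat) : Span :=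
  ⟨(ue.reg .rsp).toNat - p.1, (ue.reg .rsp).toNat - p.1 + p.2⟩

/-- **The windows a step of inverse_mdct may write**: the stack below the steady rsp (return addresses of the check calls,
pushes, the callees' frames), the sample buffer, the temp block, and the frame slots `ws` the step overwrites, each given as
`(distance below the entry rsp, length)`: `d[rbp−58H]` is `(96, 4)`. -/
def stepSpans (A : Arena) (ue : State) (ws : List (Nat × Nat)) : List Span :=
  ⟨(ue.reg .rsp).toNat - 368, (ue.reg .rsp).toNat - 184⟩ ::
  ⟨buf ue, buf ue + 4 * n ue⟩ ::
  ⟨tmp A ue, tmp A ue + 2 * n ue⟩ ::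
  ws.map (slotSpan ue)

/-- `slotSpan` unfolded. -/
theorem slotSpan_def (ue : State) (d m : Nat) :
    slotSpan ue (d, m) = ⟨(ue.reg .rsp).toNat - d, (ue.reg .rsp).toNat - d + m⟩ := id rfl

/-- `stepSpans` with no overwritten slot. -/
theorem stepSpans_nil (A : Arena) (ue : State) :
    stepSpans A ue [] =
      [⟨(ue.reg .rsp).toNat - 368, (ue.reg .rsp).toNat - 184⟩, ⟨buf ue, buf ue + 4 * n ue⟩,
       ⟨tmp A ue, tmp A ue + 2 * n ue⟩] := id rfl

/-- `stepSpans` with one overwritten slot. -/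
theorem stepSpans_one (A : Arena) (ue : State) (d m : Nat) :
    stepSpans A ue [(d, m)] =
      [⟨(ue.reg .rsp).toNat - 368, (ue.reg .rsp).toNat - 184⟩, ⟨buf ue, buf ue + 4 * n ue⟩,
       ⟨tmp A ue, tmp A ue + 2 * n ue⟩,
       ⟨(ue.reg .rsp).toNat - d, (ue.reg .rsp).toNat - d + m⟩] := id rfl

/-- `stepSpans` with two overwritten slots. -/
theorem stepSpans_two (A : Arena) (ue : State) (d m d' m' : Nat) :
    stepSpans A ue [(d, m), (d', m')] =
      [⟨(ue.reg .rsp).toNat - 368, (ue.reg .rsp).toNat - 184⟩, ⟨buf ue, buf ue + 4 * n ue⟩,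
       ⟨tmp A ue, tmp A ue + 2 * n ue⟩,
       ⟨(ue.reg .rsp).toNat - d, (ue.reg .rsp).toNat - d + m⟩,
       ⟨(ue.reg .rsp).toNat - d', (ue.reg .rsp).toNat - d' + m'⟩] := id rfl

/-- `stepSpans` with three overwritten slots. (Any number: `simp only [stepSpans, slotSpan, List.map_cons, List.map_nil]`.) -/
theorem stepSpans_three (A : Arena) (ue : State) (d m d' m' d'' m'' : Nat) :
    stepSpans A ue [(d, m), (d', m'), (d'', m'')] =
      [⟨(ue.reg .rsp).toNat - 368, (ue.reg .rsp).toNat - 184⟩, ⟨buf ue, buf ue + 4 * n ue⟩,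
       ⟨tmp A ue, tmp A ue + 2 * n ue⟩,
       ⟨(ue.reg .rsp).toNat - d, (ue.reg .rsp).toNat - d + m⟩,
       ⟨(ue.reg .rsp).toNat - d', (ue.reg .rsp).toNat - d' + m'⟩,
       ⟨(ue.reg .rsp).toNat - d'', (ue.reg .rsp).toNat - d'' + m''⟩] := id rfl

/-- The overwritten slot `p = (distance, length)` lies in the frame above the steady rsp and misses the slot `(d, m)`: a closed
fact about four numbers (`by decide`). -/
abbrev Misses (p : Nat × Nat) (d m : Nat) : Prop :=
  p.2 ≤ p.1 ∧ p.1 ≤ 184 ∧ (d + p.2 ≤ p.1 ∨ p.1 + m ≤ d)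

/-- The overwritten slot `p` misses the eleven slots of `Body`: it lies below the saved rbx (`[rbp−28H]`, distance 48) and
misses `q[rbp−78H] = f`, `d[rbp−7CH] = bt`, `d[rbp−90H] = save_point`, `q[rbp−68H] = v`. -/
abbrev MissesBody (p : Nat × Nat) : Prop :=
  48 + p.2 ≤ p.1 ∧ Misses p 128 8 ∧ Misses p 132 4 ∧ Misses p 152 4 ∧ Misses p 112 8

/-- The overwritten slot `p` misses the three slots of `SlotsBuf`. -/
abbrev MissesBuf (p : Nat × Nat) : Prop :=
  Misses p 64 8 ∧ Misses p 76 4 ∧ Misses p 176 8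

/-- The overwritten slot `p` misses the four slots of `SlotsA`. -/
abbrev MissesA (p : Nat × Nat) : Prop :=
  Misses p 72 8 ∧ Misses p 120 4 ∧ Misses p 144 8 ∧ Misses p 148 4

/-- The overwritten slot `p` misses the two slots of `SlotsS2`. -/
abbrev MissesS2 (p : Nat × Nat) : Prop :=
  Misses p 160 8 ∧ Misses p 168 8

/-- The overwritten slot `p` misses the two slots of `SlotsStep3`. -/
abbrev MissesStep3 (p : Nat × Nat) : Prop :=
  Misses p 104 4 ∧ Misses p 88 4

/-! ### One slot -/

/-- **A slot of the frame that the step does not write reads as before**: the slot is the `m` bytes at `a = ue.rsp − d`, between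
the steady rsp and the return address (`d ≤ 184`, `m ≤ d + 8`), and every overwritten slot of `ws` misses it. `hroom`, `htop`:
`Body.entry.room`, `Body.entry.top` after `simp only [vspec, conv_stackLo, conv_stackHi]`. -/
theorem Pre.slot_stays (hp : Pre others frames len A stored room ysz k c ue)
    (hroom : 7340032 + 368 ≤ (ue.reg .rsp).toNat) (htop : (ue.reg .rsp).toNat + 8 ≤ 8388608)
    {ws : List (Nat × Nat)} {m1 m2 : Mem} (hs : Mem.SameExcept (stepSpans A ue ws) m1 m2) (a : Word) (d m : Nat)
    (ha : a.toNat = (ue.reg .rsp).toNat - d) (hd : d ≤ 184) (hm : m ≤ d + 8)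
    (hws : ∀ p ∈ ws, Misses p d m) :
    m2.readLE a m = m1.readLE a m := by
  have hdata := hp.data_off_frame
  apply hs.readLE a m (by omega)
  intro x hx
  simp only [stepSpans, List.mem_cons, List.mem_map] at hx
  rcases hx with rfl | rfl | rfl | ⟨p, hpw, rfl⟩
  · simp only []
    omega
  · simp only []
    omega
  · simp only []
    omega
  · have hmiss := hws p hpw
    simp only [slotSpan]
    omega

/-- The windows of a step, as windows of the function's footprint (the form `Body.carry` takes). -/
theorem stepSpans_sub (hroom : 7340032 + 368 ≤ (ue.reg .rsp).toNat) {ws : List (Nat × Nat)} {m1 m2 : Mem}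
    (hs : Mem.SameExcept (stepSpans A ue ws) m1 m2) (hws : ∀ p ∈ ws, p.2 ≤ p.1 ∧ p.1 ≤ 184) :
    Mem.SameExcept
      [⟨(ue.reg .rsp).toNat - 368, (ue.reg .rsp).toNat⟩, ⟨buf ue, buf ue + 4 * n ue⟩, ⟨tmp A ue, tmp A ue + 2 * n ue⟩]
      m1 m2 := by
  apply hs.mono
  intro x hx a ha1 ha2
  simp only [stepSpans, List.mem_cons, List.mem_map] at hx
  rcases hx with rfl | rfl | rfl | ⟨p, hpw, rfl⟩
  · refine ⟨_, List.mem_cons_self, ?_, ?_⟩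
    · exact ha1
    · have h2 : a < (ue.reg .rsp).toNat - 184 := ha2
      show a < (ue.reg .rsp).toNat
      omega
  · exact ⟨_, List.mem_cons_of_mem _ List.mem_cons_self, ha1, ha2⟩
  · exact ⟨_, List.mem_cons_of_mem _ (List.mem_cons_of_mem _ List.mem_cons_self), ha1, ha2⟩
  · have hin := hws p hpw
    have h1 : (ue.reg .rsp).toNat - p.1 ≤ a := ha1
    have h2 : a < (ue.reg .rsp).toNat - p.1 + p.2 := ha2
    refine ⟨_, List.mem_cons_self, ?_, ?_⟩
    · show (ue.reg .rsp).toNat - 368 ≤ a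
      omega
    · show a < (ue.reg .rsp).toNat
      omega

/-! ### The structures of the assertions -/

/-- **THE FRAME RULE OF A STEP OF inverse_mdct, slots included**: `Body` at the step's exit `w` from `Body` at its entry `v`, when
the step wrote only the windows `stepSpans A ue ws` (`hs`: by `u_same` from the walker's `w_mem` and the callees' footprints,
after `simp only [stepSpans_one]` or the like) and no overwritten slot of `ws` is one of `Body`'s (`hws`: `by decide`). -/
theorem Body.carry_slots (hb : Body u₀ others frames len A stored room ysz k c ue ret v) {ws : List (Nat × Nat)}
    (hs : Mem.SameExcept (stepSpans A ue ws) v.mem w.mem) (hws : ∀ p ∈ ws, MissesBody p)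
    (hcode : CodeOK u₀ w.mem) (habi : abiInv w)
    (hrbp : w.reg .rbp = ue.reg .rsp - 8) (hrsp : w.reg .rsp = ue.reg .rsp - 184) :
    Body u₀ others frames len A stored room ysz k c ue ret w := by
  have hp := hb.pre
  have hroom := hb.entry.room
  have htop := hb.entry.top
  simp only [vspec, conv_stackLo, conv_stackHi] at hroom htop
  have hin : ∀ p ∈ ws, p.2 ≤ p.1 ∧ p.1 ≤ 184 := by
    intro p hpw
    have h := hws p hpw
    omega
  have keep : ∀ (a : Word) (d m : Nat), a.toNat = (ue.reg .rsp).toNat - d → d ≤ 184 → m ≤ d + 8 →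
      (∀ p ∈ ws, Misses p d m) → w.mem.readLE a m = v.mem.readLE a m :=
    fun a d m => hp.slot_stays hroom htop hs a d m
  refine hb.carry (stepSpans_sub hroom hs hin) hcode habi hrbp hrsp ?_ ?_ ?_ ?_ ?_ ?_ ?_ ?_ ?_ ?_ ?_
  · rw [keep _ 0 8 (by u_omega) (by omega) (by omega) (by intro p hpw; have h := hws p hpw; omega)]
    exact hb.retSlot
  · rw [keep _ 8 8 (by u_omega) (by omega) (by omega) (by intro p hpw; have h := hws p hpw; omega)]
    exact hb.rbpSlot
  · rw [keep _ 16 8 (by u_omega) (by omega) (by omega) (by intro p hpw; have h := hws p hpw; omega)]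
    exact hb.r15Slot
  · rw [keep _ 24 8 (by u_omega) (by omega) (by omega) (by intro p hpw; have h := hws p hpw; omega)]
    exact hb.r14Slot
  · rw [keep _ 32 8 (by u_omega) (by omega) (by omega) (by intro p hpw; have h := hws p hpw; omega)]
    exact hb.r13Slot
  · rw [keep _ 40 8 (by u_omega) (by omega) (by omega) (by intro p hpw; have h := hws p hpw; omega)]
    exact hb.r12Slot
  · rw [keep _ 48 8 (by u_omega) (by omega) (by omega) (by intro p hpw; have h := hws p hpw; omega)]
    exact hb.rbxSlot
  · rw [keep _ 128 8 (by u_omega) (by omega) (by omega) (fun p hpw => (hws p hpw).2.1)]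
    exact hb.fSlot
  · rw [keep _ 132 4 (by u_omega) (by omega) (by omega) (fun p hpw => (hws p hpw).2.2.1)]
    exact hb.btSlot
  · rw [keep _ 152 4 (by u_omega) (by omega) (by omega) (fun p hpw => (hws p hpw).2.2.2.1)]
    exact hb.saveSlot
  · rw [keep _ 112 8 (by u_omega) (by omega) (by omega) (fun p hpw => (hws p hpw).2.2.2.2)]
    exact hb.vSlot

/-- **`SlotsBuf` over a step**: `hb` is `Body` at the step's ENTRY. -/
theorem SlotsBuf.carry_sbuf (hsl : SlotsBuf ue v) (hb : Body u₀ others frames len A stored room ysz k c ue ret v)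
    {ws : List (Nat × Nat)} (hs : Mem.SameExcept (stepSpans A ue ws) v.mem w.mem) (hws : ∀ p ∈ ws, MissesBuf p) :
    SlotsBuf ue w := by
  have hp := hb.pre
  have hroom := hb.entry.room
  have htop := hb.entry.top
  simp only [vspec, conv_stackLo, conv_stackHi] at hroom htop
  refine ⟨?_, ?_, ?_⟩
  · rw [hp.slot_stays hroom htop hs _ 64 8 (by u_omega) (by omega) (by omega) (fun p hpw => (hws p hpw).1)]
    exact hsl.uSlot
  · rw [hp.slot_stays hroom htop hs _ 76 4 (by u_omega) (by omega) (by omega) (fun p hpw => (hws p hpw).2.1)]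
    exact hsl.nSlot
  · rw [hp.slot_stays hroom htop hs _ 176 8 (by u_omega) (by omega) (by omega) (fun p hpw => (hws p hpw).2.2)]
    exact hsl.uMidSlot

/-- **`SlotsA` over a step**: `hb` is `Body` at the step's ENTRY. -/
theorem SlotsA.carry_sa (hsl : SlotsA ue v) (hb : Body u₀ others frames len A stored room ysz k c ue ret v)
    {ws : List (Nat × Nat)} (hs : Mem.SameExcept (stepSpans A ue ws) v.mem w.mem) (hws : ∀ p ∈ ws, MissesA p) :
    SlotsA ue w := by
  have hp := hb.pre
  have hroom := hb.entry.room
  have htop := hb.entry.top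
  simp only [vspec, conv_stackLo, conv_stackHi] at hroom htop
  refine ⟨?_, ?_, ?_, ?_⟩
  · rw [hp.slot_stays hroom htop hs _ 72 8 (by u_omega) (by omega) (by omega) (fun p hpw => (hws p hpw).1)]
    exact hsl.aSlot
  · rw [hp.slot_stays hroom htop hs _ 120 4 (by u_omega) (by omega) (by omega) (fun p hpw => (hws p hpw).2.1)]
    exact hsl.n2Slot
  · rw [hp.slot_stays hroom htop hs _ 144 8 (by u_omega) (by omega) (by omega) (fun p hpw => (hws p hpw).2.2.1)]
    exact hsl.n2x4Slot
  · rw [hp.slot_stays hroom htop hs _ 148 4 (by u_omega) (by omega) (by omega) (fun p hpw => (hws p hpw).2.2.2)]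
    exact hsl.n8Slot

/-- **`SlotsS2` over a step**: `hb` is `Body` at the step's ENTRY. -/
theorem SlotsS2.carry_s2 (hsl : SlotsS2 ue v) (hb : Body u₀ others frames len A stored room ysz k c ue ret v)
    {ws : List (Nat × Nat)} (hs : Mem.SameExcept (stepSpans A ue ws) v.mem w.mem) (hws : ∀ p ∈ ws, MissesS2 p) :
    SlotsS2 ue w := by
  have hp := hb.pre
  have hroom := hb.entry.room
  have htop := hb.entry.top
  simp only [vspec, conv_stackLo, conv_stackHi] at hroom htop
  refine ⟨?_, ?_⟩
  · rw [hp.slot_stays hroom htop hs _ 160 8 (by u_omega) (by omega) (by omega) (fun p hpw => (hws p hpw).1)]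
    exact hsl.n2x4m32Slot
  · rw [hp.slot_stays hroom htop hs _ 168 8 (by u_omega) (by omega) (by omega) (fun p hpw => (hws p hpw).2)]
    exact hsl.n4x4Slot

/-- **`SlotsStep3` over a step**: `hb` is `Body` at the step's ENTRY. -/
theorem SlotsStep3.carry_s3 (hsl : SlotsStep3 k ue v) (hb : Body u₀ others frames len A stored room ysz k c ue ret v)
    {ws : List (Nat × Nat)} (hs : Mem.SameExcept (stepSpans A ue ws) v.mem w.mem) (hws : ∀ p ∈ ws, MissesStep3 p) :
    SlotsStep3 k ue w := by
  have hp := hb.pre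
  have hroom := hb.entry.room
  have htop := hb.entry.top
  simp only [vspec, conv_stackLo, conv_stackHi] at hroom htop
  refine ⟨?_, ?_⟩
  · rw [hp.slot_stays hroom htop hs _ 104 4 (by u_omega) (by omega) (by omega) (fun p hpw => (hws p hpw).1)]
    exact hsl.ilogSlot
  · rw [hp.slot_stays hroom htop hs _ 88 4 (by u_omega) (by omega) (by omega) (fun p hpw => (hws p hpw).2)]
    exact hsl.n2m1Slot

/-- **One more slot over a step** (a slot of the segment's own assertion: `n4Slot`, `rSlot`, `d0Slot` …), with `Body` at the
step's ENTRY giving the room facts: the `m` bytes at `a = ue.rsp − d`. `ha` gets the room fact as its argument: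
`(fun hroom => by u_omega)`; `hd`, `hm`, `hws`: `by decide`. -/
theorem Body.slot_over (hb : Body u₀ others frames len A stored room ysz k c ue ret v) {ws : List (Nat × Nat)} {m2 : Mem}
    (hs : Mem.SameExcept (stepSpans A ue ws) v.mem m2) (a : Word) (d m : Nat)
    (ha : 7340032 + 368 ≤ (ue.reg .rsp).toNat → a.toNat = (ue.reg .rsp).toNat - d) (hd : d ≤ 184) (hm : m ≤ d + 8)
    (hws : ∀ p ∈ ws, Misses p d m) :
    m2.readLE a m = v.mem.readLE a m := by
  have hroom := hb.entry.room
  have htop := hb.entry.top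
  simp only [vspec, conv_stackLo, conv_stackHi] at hroom htop
  exact hb.pre.slot_stays hroom htop hs a d m (ha hroom) hd hm hws

/-- **FRAME0 over a step**: `Body`, `SlotsBuf` and `SlotsA` at the step's exit from ONE `SameExcept` (segments 2 to 6). -/
theorem Body.carry_frame0 (hb : Body u₀ others frames len A stored room ysz k c ue ret v) (hsb : SlotsBuf ue v)
    (hsa : SlotsA ue v) {ws : List (Nat × Nat)}
    (hs : Mem.SameExcept (stepSpans A ue ws) v.mem w.mem)
    (hws : ∀ p ∈ ws, MissesBody p ∧ MissesBuf p ∧ MissesA p)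
    (hcode : CodeOK u₀ w.mem) (habi : abiInv w)
    (hrbp : w.reg .rbp = ue.reg .rsp - 8) (hrsp : w.reg .rsp = ue.reg .rsp - 184) :
    Body u₀ others frames len A stored room ysz k c ue ret w ∧ SlotsBuf ue w ∧ SlotsA ue w := by
  refine ⟨?_, ?_, ?_⟩
  · exact hb.carry_slots hs (fun p hpw => (hws p hpw).1) hcode habi hrbp hrsp
  · exact hsb.carry_sbuf hb hs (fun p hpw => (hws p hpw).2.1)
  · exact hsa.carry_sa hb hs (fun p hpw => (hws p hpw).2.2)

/-! ### The slots of `Body` as facts about a memory -/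

/-- **The eleven frame slots of `Body`, as facts about a MEMORY `m`** (`ue` the entry state of inverse_mdct): for a step whose
memory relation is not a `SameExcept (stepSpans …)` (then `Body.carry_slots` is shorter). -/
structure FrameSlots (A : Arena) (ue : State) (ret : Word) (m : Mem) : Prop where
  /-- the return address -/
  retAt : UInt64.ofNat (m.readLE (ue.reg .rsp) 8) = ret
  /-- `[rbp]`: the caller's rbp -/
  rbpAt : UInt64.ofNat (m.readLE (ue.reg .rsp - 8) 8) = ue.reg .rbp
  /-- `[rbp − 8]`: the saved r15 -/
  r15At : UInt64.ofNat (m.readLE (ue.reg .rsp - 16) 8) = ue.reg .r15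
  /-- `[rbp − 10H]`: the saved r14 -/
  r14At : UInt64.ofNat (m.readLE (ue.reg .rsp - 24) 8) = ue.reg .r14
  /-- `[rbp − 18H]`: the saved r13 -/
  r13At : UInt64.ofNat (m.readLE (ue.reg .rsp - 32) 8) = ue.reg .r13
  /-- `[rbp − 20H]`: the saved r12 -/
  r12At : UInt64.ofNat (m.readLE (ue.reg .rsp - 40) 8) = ue.reg .r12
  /-- `[rbp − 28H]`: the saved rbx -/
  rbxAt : UInt64.ofNat (m.readLE (ue.reg .rsp - 48) 8) = ue.reg .rbx
  /-- `q[rbp − 78H] = f` -/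
  fAt : UInt64.ofNat (m.readLE (ue.reg .rsp - 128) 8) = ue.reg .rdx
  /-- `d[rbp − 7CH] = bt` -/
  btAt : m.readLE (ue.reg .rsp - 132) 4 = bt ue
  /-- `d[rbp − 90H] = save_point` -/
  saveAt : m.readLE (ue.reg .rsp - 152) 4 = A.T
  /-- `q[rbp − 68H] = v` -/
  vAt : m.readLE (ue.reg .rsp - 112) 8 = tmp A ue

/-- The slots of `Body`, at its state's memory. -/
theorem Body.frameSlots (hb : Body u₀ others frames len A stored room ysz k c ue ret v) : FrameSlots A ue ret v.mem :=
  { retAt := hb.retSlot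
    rbpAt := hb.rbpSlot
    r15At := hb.r15Slot
    r14At := hb.r14Slot
    r13At := hb.r13Slot
    r12At := hb.r12Slot
    rbxAt := hb.rbxSlot
    fAt := hb.fSlot
    btAt := hb.btSlot
    saveAt := hb.saveSlot
    vAt := hb.vSlot }

/-- **The frame rule of the slots of `Body`**: a memory that agrees with `m` on the four pieces of the frame that hold them
(`[rsp−152, rsp−148)` save_point, `[rsp−132, rsp−120)` bt and f, `[rsp−112, rsp−104)` v, `[rsp−48, rsp+8)` the saved registers and
the return address; `rsp` the ENTRY rsp) has the same slots. -/
theorem FrameSlots.slots_eqOn {m m' : Mem} (hf : FrameSlots A ue ret m)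
    (hroom : 7340032 + 368 ≤ (ue.reg .rsp).toNat) (htop : (ue.reg .rsp).toNat + 8 ≤ 8388608)
    (e1 : Mem.EqOn ((ue.reg .rsp).toNat - 152) ((ue.reg .rsp).toNat - 148) m m')
    (e2 : Mem.EqOn ((ue.reg .rsp).toNat - 132) ((ue.reg .rsp).toNat - 120) m m')
    (e3 : Mem.EqOn ((ue.reg .rsp).toNat - 112) ((ue.reg .rsp).toNat - 104) m m')
    (e4 : Mem.EqOn ((ue.reg .rsp).toNat - 48) ((ue.reg .rsp).toNat + 8) m m') : FrameSlots A ue ret m' := by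
  refine ⟨?_, ?_, ?_, ?_, ?_, ?_, ?_, ?_, ?_, ?_, ?_⟩
  · rw [e4.readLE (ue.reg .rsp) 8 (by u_omega) (by u_omega) (by u_omega)]
    exact hf.retAt
  · rw [e4.readLE (ue.reg .rsp - 8) 8 (by u_omega) (by u_omega) (by u_omega)]
    exact hf.rbpAt
  · rw [e4.readLE (ue.reg .rsp - 16) 8 (by u_omega) (by u_omega) (by u_omega)]
    exact hf.r15At
  · rw [e4.readLE (ue.reg .rsp - 24) 8 (by u_omega) (by u_omega) (by u_omega)]
    exact hf.r14At
  · rw [e4.readLE (ue.reg .rsp - 32) 8 (by u_omega) (by u_omega) (by u_omega)]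
    exact hf.r13At
  · rw [e4.readLE (ue.reg .rsp - 40) 8 (by u_omega) (by u_omega) (by u_omega)]
    exact hf.r12At
  · rw [e4.readLE (ue.reg .rsp - 48) 8 (by u_omega) (by u_omega) (by u_omega)]
    exact hf.rbxAt
  · rw [e2.readLE (ue.reg .rsp - 128) 8 (by u_omega) (by u_omega) (by u_omega)]
    exact hf.fAt
  · rw [e2.readLE (ue.reg .rsp - 132) 4 (by u_omega) (by u_omega) (by u_omega)]
    exact hf.btAt
  · rw [e1.readLE (ue.reg .rsp - 152) 4 (by u_omega) (by u_omega) (by u_omega)]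
    exact hf.saveAt
  · rw [e3.readLE (ue.reg .rsp - 112) 8 (by u_omega) (by u_omega) (by u_omega)]
    exact hf.vAt

/-- `Body.carry` with the eleven slot facts as ONE bundle at the exit memory. -/
theorem Body.carry_of_slots (hb : Body u₀ others frames len A stored room ysz k c ue ret v)
    (hs : Mem.SameExcept
      [⟨(ue.reg .rsp).toNat - 368, (ue.reg .rsp).toNat⟩, ⟨buf ue, buf ue + 4 * n ue⟩, ⟨tmp A ue, tmp A ue + 2 * n ue⟩]
      v.mem w.mem)
    (hf : FrameSlots A ue ret w.mem) (hcode : CodeOK u₀ w.mem) (habi : abiInv w)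
    (hrbp : w.reg .rbp = ue.reg .rsp - 8) (hrsp : w.reg .rsp = ue.reg .rsp - 184) :
    Body u₀ others frames len A stored room ysz k c ue ret w :=
  hb.carry hs hcode habi hrbp hrsp hf.retAt hf.rbpAt hf.r15At hf.r14At hf.r13At hf.r12At hf.rbxAt hf.fAt
    hf.btAt hf.saveAt hf.vAt

/-! ### What the callees' preconditions need of the function's `Body` -/

/-- **The shadow clause of a callee** entered at `s` (its stack pointer below the steady one) when no shadow byte was written
since `v` (`hun : by v_untouched`): the live list is the function's with the temp block. -/
theorem Body.shadowPre_below (hb : Body u₀ others frames len A stored room ysz k c ue ret v) {s : State}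
    (hun : ShadowUntouched v.mem s.mem) (hle : (s.reg .rsp).toNat + 8 ≤ (ue.reg .rsp).toNat - 184)
    (h8 : (s.reg .rsp).toNat % 8 = 0) (hlo : 0x700000 ≤ (s.reg .rsp).toNat + 8) :
    ShadowPre (A.newTempObj (2 * n ue) :: others) frames s := by
  refine ⟨(hb.shadow.untouched hun).lower hle (by omega) hlo, ?_⟩
  intro o ho
  rcases List.mem_cons.mp ho with rfl | ho
  · have := hb.pre.arenaText
    unfold Arena.newTempObj Arena.tempObj
    simp only
    omega
  · exact hb.pre.shadow.offText o ho

/-- The first `n / 2` floats of the sample buffer are live (with one more object `o`, the temp block, in the live list). -/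
theorem Pre.buf_live (hp : Pre others frames len A stored room ysz k c ue) (o : Obj) :
    LiveBytes (o :: others) frames (buf ue) (4 * (n ue / 2)) := by
  have hnle := hp.n_le
  have hl := hp.blkLive o _ hp.buf_blk
  exact LiveBytes.of_block hl (Nat.le_refl _) (by simp only []; omega)

/-- All `n` floats of the sample buffer are live (with one more object `o` in the live list). -/
theorem Pre.buf_live_all (hp : Pre others frames len A stored room ysz k c ue) (o : Obj) :
    LiveBytes (o :: others) frames (buf ue) (4 * n ue) := by
  have hnle := hp.n_le
  have hl := hp.blkLive o _ hp.buf_blk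
  exact LiveBytes.of_block hl (Nat.le_refl _) (by simp only []; omega)

/-- The twiddle table `A` (`2 n` bytes) is live (with one more object `o` in the live list). -/
theorem Pre.tabA_live (hp : Pre others frames len A stored room ysz k c ue) (o : Obj) :
    LiveBytes (o :: others) frames (tabA ue) (2 * n ue) := by
  have hl := hp.blkLive o _ hp.tabA_blk
  exact LiveBytes.of_block hl (Nat.le_refl _) (Nat.le_refl _)

end Carry

/-! ### The side conditions are closed numbers: a test -/

/-- Segment 6's two overwritten slots `d[rbp−80H]` = `(136, 4)` and `d[rbp−58H]` = `(96, 4)` miss every slot of `Body`, `SlotsBuf`,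
`SlotsA`, `SlotsS2` and `SlotsStep3`: by `decide`. -/
example : ∀ p ∈ [(136, 4), (96, 4)], MissesBody p ∧ MissesBuf p ∧ MissesA p ∧ MissesS2 p ∧ MissesStep3 p := by
  decide

end Vorbis.Spec.inverse_mdct
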